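-- pv_equiv track=rewrite | github.com/Pengjp/lc | 牛客/代码/中级/选零食.py | process
-- ===== SOURCE A (Python) =====
-- def process(arr, index, rest):
--     if rest < 0:
--         return -1
--     if index == len(arr):
--         return 1
--     # 是否要index位置的零食
--     next1 = process(arr, index+1, rest) # 不要
--     next2 = process(arr, index+1, rest-arr[index]) # 要
--     if next2 == -1:
--         return next1
--     else:
--         return next1 + next2
-- ===== SOURCE B (Python) =====
-- def process(arr, index, rest):
--     if rest < 0:
--         return -1
--     # DP over the multiset of remaining budgets: states[r] = number of choice
--     # paths over arr[index:i] whose remaining budget is r (budgets never go < 0).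
--     states = {rest: 1}
--     for i in range(index, len(arr)):
--         nxt = {}
--         for r, c in states.items():
--             nxt[r] = nxt.get(r, 0) + c
--             t = r - arr[i]
--             if t >= 0:
--                 nxt[t] = nxt.get(t, 0) + c
--         states = nxt
--     return sum(states.values())
-- ===== Notes on version B (the rewrite author's own statement) =====
-- stated objective: alternative
-- what changed: Replaced the binary-branching subset recursion by an iterative DP that keeps a counter mapping each distinct reachable remaining budget to its number of paths.
import Mathlib
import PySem

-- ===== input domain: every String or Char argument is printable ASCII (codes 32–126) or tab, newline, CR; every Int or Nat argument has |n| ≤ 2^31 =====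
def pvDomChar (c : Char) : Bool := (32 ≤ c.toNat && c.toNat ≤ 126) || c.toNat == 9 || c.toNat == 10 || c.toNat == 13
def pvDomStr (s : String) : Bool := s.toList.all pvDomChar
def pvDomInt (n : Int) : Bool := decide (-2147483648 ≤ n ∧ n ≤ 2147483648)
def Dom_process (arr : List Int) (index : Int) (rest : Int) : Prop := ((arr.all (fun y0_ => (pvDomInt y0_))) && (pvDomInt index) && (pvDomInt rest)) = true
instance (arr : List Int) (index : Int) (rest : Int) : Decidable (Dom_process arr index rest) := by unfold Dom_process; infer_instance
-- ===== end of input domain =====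

-- B replaces A's branching recursion by an iterative DP over a counter of distinct
-- remaining budgets (an alternative algorithm; much cheaper when budgets collide).


-- ===== PORT A =====
def process (arr : List Int) (index : Int) (rest : Int) : Int :=
  if rest < 0 then -1
  else if index = (arr.length : Int) then 1
  else if (arr.length : Int) < index then 0
    -- ^ totality guard only: Python recurses forever here (these inputs are outside Pre_)
  else
    let next1 := process arr (index + 1) rest
    let next2 := process arr (index + 1) (rest - (PySem.List.pyGet? arr index).getD 0)
    if next2 = -1 then next1 else next1 + next2
termination_by ((arr.length : Int) - index).toNat
decreasing_by all_goals omega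

-- ===== PORT B =====
-- one pass of the inner 'for r, c in states.items()' loop (arr[i] = pyGet?, outside-range → dflt, excluded by Pre_)
def bStep (arr : List Int) (d : PySem.Dict Int Int) (i : Int) : PySem.Dict Int Int :=
  d.items.foldl (fun m p =>
    let m1 := m.insert p.1 (m.getD p.1 0 + p.2)
    let t := p.1 - (PySem.List.pyGet? arr i).getD 0
    if 0 ≤ t then m1.insert t (m1.getD t 0 + p.2) else m1) PySem.Dict.empty

def process_alt (arr : List Int) (index : Int) (rest : Int) : Int :=
  if rest < 0 then -1
  else
    let states := (PySem.List.pyRange index (arr.length : Int) 1).foldl (bStep arr) (PySem.Dict.empty.insert rest 1)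
    states.values.sum

-- ===== PRECONDITION & SPEC =====
-- Pre_ excludes exactly the inputs where the Python A does not return: with rest ≥ 0,
-- index > len(arr) recurses forever (RecursionError) and index < -len(arr) raises IndexError.
def Pre_process (arr : List Int) (index : Int) (rest : Int) : Prop :=
  rest < 0 ∨ (-(arr.length : Int) ≤ index ∧ index ≤ (arr.length : Int))
instance (arr : List Int) (index : Int) (rest : Int) : Decidable (Pre_process arr index rest) := by unfold Pre_process; infer_instance

def pvWitness_process : List Int × Int × Int := ([1, 2, 3], 0, 3)

def Spec_process (arr : List Int) (index : Int) (rest : Int) (out : Int) : Prop := out = process_alt arr index rest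
instance (arr : List Int) (index : Int) (rest : Int) (out : Int) : Decidable (Spec_process arr index rest out) := by unfold Spec_process; infer_instance

-- ===== CLAIM (what is proved, stated in full; the proofs are below) =====
def Claim_equal_process : Prop := ∀ (arr : List Int) (index : Int) (rest : Int), Dom_process arr index rest → Pre_process arr index rest → Spec_process arr index rest (process arr index rest)

-- ===== LEMMAS AND PROOFS =====

-- weighted sum of a dict's items, weight P on the key
def wsum (P : Int → Int) (d : PySem.Dict Int Int) : Int :=
  (d.items.map (fun p => p.2 * P p.1)).sum

lemma wsum_values_sum (d : PySem.Dict Int Int) : wsum (fun _ => 1) d = d.values.sum := by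
  simp [wsum, PySem.Dict.values]

lemma repl_sum (P : Int → Int) (k v w : Int) :
    ∀ l : List (Int × Int), (l.map Prod.fst).Nodup → (k, w) ∈ l →
    ((l.map (fun p => if p.1 == k then (k, v) else p)).map (fun p => p.2 * P p.1)).sum
      = (l.map (fun p => p.2 * P p.1)).sum - w * P k + v * P k := by
  intro l
  induction l with
  | nil => intro _ h; cases h
  | cons p l ih =>
    intro hnd hmem
    simp only [List.map_cons, List.nodup_cons, List.mem_map] at hnd
    rcases List.mem_cons.mp hmem with h | h
    · subst h
      have htail : ∀ q ∈ l, (if (q.1 == k) = true then (k, v) else q) = q := by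
        intro q hq
        have hne : ¬ (q.1 == k) = true := by
          simp only [beq_iff_eq]
          intro he; exact hnd.1 ⟨q, hq, by simpa using he⟩
        rw [if_neg hne]
      simp only [List.map_cons, List.sum_cons]
      rw [List.map_congr_left htail]
      simp only [beq_self_eq_true, if_pos, List.map_id']
      ring
    · have hk : k ∈ l.map Prod.fst := List.mem_map.mpr ⟨(k, w), h, rfl⟩
      have hpk : p.1 ≠ k := by
        intro he
        exact hnd.1 ⟨(k, w), h, by simpa using he.symm⟩
      simp only [List.map_cons, List.sum_cons]
      rw [if_neg (by simp [hpk])]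
      rw [ih hnd.2 h]
      ring

lemma wsum_insert (P : Int → Int) (d : PySem.Dict Int Int) (k c : Int)
    (hnd : d.keys.Nodup) :
    wsum P (d.insert k (d.getD k 0 + c)) = wsum P d + c * P k := by
  by_cases hc : d.contains k = true
  · have hk : k ∈ d.keys := (PySem.Dict.contains_iff_mem_keys d k).mp hc
    have : ∃ p ∈ d.items, p.1 = k := by
      simpa [PySem.Dict.keys, List.mem_map] using hk
    rcases this with ⟨p, hp, hpk⟩
    have hpeq : p = (k, p.2) := by cases p; simp_all
    rw [hpeq] at hp
    have hget : d.getD k 0 = p.2 := PySem.Dict.getD_of_mem_items d hp hnd 0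
    unfold wsum
    rw [PySem.Dict.items_insert_of_contains d _ hc]
    have hndl : (d.items.map Prod.fst).Nodup := by
      simpa [PySem.Dict.keys] using hnd
    rw [repl_sum P k (d.getD k 0 + c) p.2 d.items hndl hp, hget]
    ring
  · have hget : d.getD k 0 = 0 := PySem.Dict.getD_of_not_contains d 0 (by simpa using hc)
    unfold wsum
    rw [PySem.Dict.items_insert_of_not_contains d _ (by simpa using hc)]
    rw [hget]
    simp

-- keys stay Nodup through one DP pass
lemma nodup_bStep_aux (arr : List Int) (i : Int) :
    ∀ (l : List (Int × Int)) (m : PySem.Dict Int Int), m.keys.Nodup →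
    (l.foldl (fun m p =>
      let m1 := m.insert p.1 (m.getD p.1 0 + p.2)
      let t := p.1 - (PySem.List.pyGet? arr i).getD 0
      if 0 ≤ t then m1.insert t (m1.getD t 0 + p.2) else m1) m).keys.Nodup := by
  intro l
  induction l with
  | nil => intro m hm; simpa using hm
  | cons p l ih =>
    intro m hm
    simp only [List.foldl_cons]
    apply ih
    have h1 := PySem.Dict.nodup_keys_insert m p.1 (m.getD p.1 0 + p.2) hm
    split_ifs with ht
    · exact PySem.Dict.nodup_keys_insert _ _ _ h1
    · exact h1

-- keys stay non-negative through one DP pass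
lemma keys_nonneg_bStep_aux (arr : List Int) (i : Int) :
    ∀ (l : List (Int × Int)) (m : PySem.Dict Int Int),
    (∀ r ∈ m.keys, 0 ≤ r) →
    (∀ r ∈ (l.foldl (fun m p =>
      let m1 := m.insert p.1 (m.getD p.1 0 + p.2)
      let t := p.1 - (PySem.List.pyGet? arr i).getD 0
      if 0 ≤ t then m1.insert t (m1.getD t 0 + p.2) else m1) m).keys, 0 ≤ r) ∨
    (∃ p ∈ l, ¬ (0 ≤ p.1)) := by
  intro l
  induction l with
  | nil => intro m hm; left; simpa using hm
  | cons p l ih =>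
    intro m hm
    by_cases hp : (0:Int) ≤ p.1
    · simp only [List.foldl_cons]
      by_cases ht : (0:Int) ≤ p.1 - (PySem.List.pyGet? arr i).getD 0
      · rw [if_pos ht]
        have hkeys : ∀ r ∈ ((m.insert p.1 (m.getD p.1 0 + p.2)).insert
            (p.1 - (PySem.List.pyGet? arr i).getD 0)
            ((m.insert p.1 (m.getD p.1 0 + p.2)).getD (p.1 - (PySem.List.pyGet? arr i).getD 0) 0 + p.2)).keys,
            0 ≤ r := by
          intro r hr
          rcases (PySem.Dict.mem_keys_insert _ _ _ _).mp hr with h | h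
          · omega
          · rcases (PySem.Dict.mem_keys_insert _ _ _ _).mp h with h2 | h2
            · omega
            · exact hm r h2
        rcases ih _ hkeys with h | h
        · left; exact h
        · right; exact ⟨h.choose, List.mem_cons_of_mem _ h.choose_spec.1, h.choose_spec.2⟩
      · rw [if_neg ht]
        have hkeys : ∀ r ∈ (m.insert p.1 (m.getD p.1 0 + p.2)).keys, 0 ≤ r := by
          intro r hr
          rcases (PySem.Dict.mem_keys_insert _ _ _ _).mp hr with h | h
          · omega
          · exact hm r h
        rcases ih _ hkeys with h | h
        · left; exact h
        · right; exact ⟨h.choose, List.mem_cons_of_mem _ h.choose_spec.1, h.choose_spec.2⟩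
    · right; exact ⟨p, List.mem_cons_self, hp⟩

-- one DP pass redistributes the weighted sum (generalized over start dict)
lemma bStep_sum_aux (arr : List Int) (i : Int) (P : Int → Int) :
    ∀ (l : List (Int × Int)) (m : PySem.Dict Int Int), m.keys.Nodup →
    wsum P (l.foldl (fun m p =>
      let m1 := m.insert p.1 (m.getD p.1 0 + p.2)
      let t := p.1 - (PySem.List.pyGet? arr i).getD 0
      if 0 ≤ t then m1.insert t (m1.getD t 0 + p.2) else m1) m)
    = wsum P m + (l.map (fun p => p.2 * (P p.1 +
        (if 0 ≤ p.1 - (PySem.List.pyGet? arr i).getD 0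
         then P (p.1 - (PySem.List.pyGet? arr i).getD 0) else 0)))).sum := by
  intro l
  induction l with
  | nil => intro m hm; simp
  | cons p l ih =>
    intro m hm
    simp only [List.foldl_cons, List.map_cons, List.sum_cons]
    set a := (PySem.List.pyGet? arr i).getD 0 with ha
    have h1 : (m.insert p.1 (m.getD p.1 0 + p.2)).keys.Nodup :=
      PySem.Dict.nodup_keys_insert _ _ _ hm
    by_cases ht : (0:Int) ≤ p.1 - a
    · simp only [ht, if_pos]
      rw [ih _ (PySem.Dict.nodup_keys_insert _ _ _ h1)]
      rw [wsum_insert P _ _ _ h1, wsum_insert P _ _ _ hm]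
      ring
    · simp only [ht, if_neg, not_false_iff]
      rw [ih _ h1, wsum_insert P _ _ _ hm]
      ring

lemma bStep_nodup (arr : List Int) (i : Int) (d : PySem.Dict Int Int) :
    (bStep arr d i).keys.Nodup := by
  unfold bStep
  exact nodup_bStep_aux arr i d.items PySem.Dict.empty (by simp [PySem.Dict.empty, PySem.Dict.keys])

lemma mem_items_nonneg (d : PySem.Dict Int Int) (h : ∀ r ∈ d.keys, 0 ≤ r) :
    ∀ p ∈ d.items, 0 ≤ p.1 := by
  intro p hp
  exact h p.1 (PySem.Dict.mem_keys_of_mem_items _ hp)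

lemma bStep_keys_nonneg (arr : List Int) (i : Int) (d : PySem.Dict Int Int)
    (h : ∀ r ∈ d.keys, 0 ≤ r) : ∀ r ∈ (bStep arr d i).keys, 0 ≤ r := by
  unfold bStep
  rcases keys_nonneg_bStep_aux arr i d.items PySem.Dict.empty
      (by simp [PySem.Dict.empty, PySem.Dict.keys]) with hh | hh
  · exact hh
  · rcases hh with ⟨p, hp, hneg⟩
    exact absurd (mem_items_nonneg d h p hp) hneg

-- A's recursion: ≥ 1 whenever rest ≥ 0 and index ≤ len
lemma process_pos (arr : List Int) :
    ∀ (i r : Int), i ≤ (arr.length : Int) → 0 ≤ r → 1 ≤ process arr i r := by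
  intro i
  have hw : ∀ n : ℕ, ∀ i r : Int, ((arr.length : Int) - i).toNat = n →
      i ≤ (arr.length : Int) → 0 ≤ r → 1 ≤ process arr i r := by
    intro n
    induction n with
    | zero =>
      intro i r hn hi hr
      have : i = (arr.length : Int) := by omega
      rw [process]
      simp [this, not_lt.mpr hr]
    | succ n ih =>
      intro i r hn hi hr
      have hlt : i < (arr.length : Int) := by omega
      rw [process]
      simp only [not_lt.mpr hr, if_false, if_neg (by omega : ¬ i = (arr.length : Int)),
        if_neg (by omega : ¬ (arr.length : Int) < i)]
      have h1 : 1 ≤ process arr (i + 1) r := ih (i + 1) r (by omega) (by omega) hr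
      by_cases h2 : process arr (i + 1) (r - (PySem.List.pyGet? arr i).getD 0) = -1
      · simp [h2]; omega
      · simp only [h2, if_neg, not_false_iff]
        have h3 : 0 ≤ process arr (i + 1) (r - (PySem.List.pyGet? arr i).getD 0) := by
          by_cases hrr : 0 ≤ r - (PySem.List.pyGet? arr i).getD 0
          · have := ih (i + 1) _ (by omega) (by omega) hrr; omega
          · exfalso; apply h2; rw [process]; simp [show r - (PySem.List.pyGet? arr i).getD 0 < 0 by omega]
        omega
  intro r hi hr
  exact hw ((arr.length : Int) - i).toNat i r rfl hi hr

-- A's recurrence in additive form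
lemma process_rec (arr : List Int) (i r : Int) (hi : i < (arr.length : Int)) (hr : 0 ≤ r) :
    process arr i r = process arr (i + 1) r +
      (if 0 ≤ r - (PySem.List.pyGet? arr i).getD 0
       then process arr (i + 1) (r - (PySem.List.pyGet? arr i).getD 0) else 0) := by
  rw [process]
  simp only [not_lt.mpr hr, if_false, if_neg (by omega : ¬ i = (arr.length : Int)),
    if_neg (by omega : ¬ (arr.length : Int) < i)]
  by_cases ht : 0 ≤ r - (PySem.List.pyGet? arr i).getD 0
  · have : 1 ≤ process arr (i + 1) (r - (PySem.List.pyGet? arr i).getD 0) :=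
      process_pos arr (i + 1) _ (by omega) ht
    simp only [ht, if_pos]
    rw [if_neg (by omega)]
  · simp only [ht, if_neg, not_false_iff]
    have : process arr (i + 1) (r - (PySem.List.pyGet? arr i).getD 0) = -1 := by
      rw [process]; simp [show r - (PySem.List.pyGet? arr i).getD 0 < 0 by omega]
    simp [this]

-- wsum only depends on P at the keys
lemma wsum_congr (P Q : Int → Int) (d : PySem.Dict Int Int)
    (h : ∀ r ∈ d.keys, P r = Q r) : wsum P d = wsum Q d := by
  unfold wsum
  congr 1
  apply List.map_congr_left
  intro p hp
  rw [h p.1 (PySem.Dict.mem_keys_of_mem_items _ hp)]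

-- main loop invariant: the final count equals the process-weighted sum of the current states
lemma loop_inv (arr : List Int) :
    ∀ (n : ℕ) (i : Int) (d : PySem.Dict Int Int), ((arr.length : Int) - i).toNat = n →
    i ≤ (arr.length : Int) → d.keys.Nodup → (∀ r ∈ d.keys, 0 ≤ r) →
    ((PySem.List.pyRange i (arr.length : Int) 1).foldl (bStep arr) d).values.sum
      = wsum (process arr i) d := by
  intro n
  induction n with
  | zero =>
    intro i d hn hi hnd hpos
    have hie : i = (arr.length : Int) := by omega
    have hnil : PySem.List.pyRange i (arr.length : Int) 1 = [] := by
      rw [PySem.List.pyRange_one, hn]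
      simp
    rw [hnil]
    simp only [List.foldl_nil]
    rw [← wsum_values_sum]
    apply wsum_congr
    intro r hr
    rw [process]
    simp [hie, not_lt.mpr (hpos r hr)]
  | succ n ih =>
    intro i d hn hi hnd hpos
    have hlt : i < (arr.length : Int) := by omega
    rw [PySem.List.pyRange_one_cons hlt, List.foldl_cons]
    rw [ih (i + 1) (bStep arr d i) (by omega) (by omega) (bStep_nodup arr i d)
      (bStep_keys_nonneg arr i d hpos)]
    unfold bStep
    rw [bStep_sum_aux arr i (process arr (i + 1)) d.items PySem.Dict.empty
      (by simp [PySem.Dict.empty, PySem.Dict.keys])]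
    have hempty : wsum (process arr (i + 1)) PySem.Dict.empty = 0 := by
      simp [wsum, PySem.Dict.empty]
    rw [hempty, zero_add]
    unfold wsum
    congr 1
    apply List.map_congr_left
    intro p hp
    rw [process_rec arr i p.1 hlt (mem_items_nonneg d hpos p hp)]

-- ===== VERDICT (by name: the statement is the Claim_ definition above) =====
theorem process_spec : Claim_equal_process := by
  intro arr index rest _ hpre
  unfold Spec_process process_alt
  by_cases hr : rest < 0
  · rw [process]; simp [hr]
  · have hi : index ≤ (arr.length : Int) := by
      rcases hpre with h | h
      · omega
      · exact h.2
    simp only [hr, if_neg, not_false_iff]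
    have hd : (PySem.Dict.empty.insert rest (1:Int)).keys = [rest] := by
      simp [PySem.Dict.empty, PySem.Dict.insert, PySem.Dict.keys]
    rw [loop_inv arr ((arr.length : Int) - index).toNat index _ rfl hi
      (by rw [hd]; simp) (by rw [hd]; intro r hrr; simp at hrr; omega)]
    have : (PySem.Dict.empty.insert rest (1:Int)).items = [(rest, 1)] := by
      simp [PySem.Dict.empty, PySem.Dict.insert]
    unfold wsum
    rw [this]
    simp
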